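-- pv_equiv track=rewrite | github.com/LudvigOlsen/utipy | utipy/string/letter_strings.py | letter_strings
-- ===== SOURCE A (Python) =====
-- from string import ascii_lowercase, ascii_uppercase
-- import itertools
-- from typing import List, Optional
--
-- def letter_strings(n: int, num_chars: Optional[int] = None, upper: bool = False, descending: bool = False) -> List[str]:
--     """
--     Generate a sequence of `n` letter strings (aa, ab, ac, ...).
--
--     Parameters
--     ----------
--     n : int
--         Number of letter strings to generate.
--         When `num_chars` is not specified, this also determines the number of
--         characters in the strings.
--     num_chars : int or None
--         The (starting) number of characters in the strings.
--         When `None`, this is determined by `n`.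
--     upper : bool
--         Whether to use uppercase letters instead of lowercase.
--     descending : bool
--         Whether to use letters in descending order.
--
--     Returns
--     -------
--     list of str
--         A list of letter strings.
--         E.g. `['aa', 'ab', 'ac']`.
--     """
--
--     # Number of letters in the ascii alphabet
--     num_available_letters = 26
--
--     if num_chars is None:
--         # Find the necessary number of characters
--         # to create the IDs
--         num_chars = 1
--         while n > num_available_letters ** num_chars:
--             num_chars += 1
--
--     # Init letter string generator
--     generator = letter_string_generator(
--         num_chars=num_chars, upper=upper, descending=descending)
--
--     # Get the n first letter IDs
--     return list(itertools.islice(generator, n))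
--
-- def letter_string_generator(num_chars: int = 1, upper: bool = False, descending: bool = False):
--     """
--     Letter string generator.
--
--     Parameters
--     ----------
--     num_chars : int
--         The (starting) number of characters in the yielded strings.
--     upper : bool
--         Whether to use uppercase letters instead of lowercase.
--     descending : bool
--         Whether to use letters in descending order.
--
--     Yields
--     ------
--     str
--         Given `num_chars` is 2:
--             "aa", "ab", "ac", ... "aaa", "aab" ...
--     """
--     letters = ascii_uppercase if upper else ascii_lowercase
--     if descending:
--         letters = letters[::-1]
--     while True:
--         for s in itertools.product(letters, repeat=num_chars):
--             yield "".join(s)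
--         num_chars += 1
-- ===== SOURCE B (Python) =====
-- from string import ascii_lowercase, ascii_uppercase
-- from typing import List, Optional
--
--
-- def letter_strings(n: int, num_chars: Optional[int] = None, upper: bool = False, descending: bool = False) -> List[str]:
--     """
--     Generate a sequence of `n` letter strings (aa, ab, ...) by direct
--     base-26 digit arithmetic instead of itertools.product.
--     """
--     if num_chars is None:
--         # Find the necessary number of characters to create the IDs
--         num_chars = 1
--         while n > 26 ** num_chars:
--             num_chars += 1
--
--     letters = ascii_uppercase if upper else ascii_lowercase
--     if descending:
--         letters = letters[::-1]
--
--     out = []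
--     length = num_chars      # current string length
--     counter = 0             # index within the block of `length`-char strings
--     block = 26 ** length    # number of strings of the current length
--     for _ in range(n):
--         # write `counter` in base 26 as `length` digits, most significant first
--         digits = []
--         x = counter
--         for _ in range(length):
--             digits.append(letters[x % 26])
--             x //= 26
--         digits.reverse()
--         out.append("".join(digits))
--         counter += 1
--         if counter == block:
--             counter = 0
--             length += 1
--             block = 26 ** length
--     return out
-- ===== Notes on version B (the rewrite author's own statement) =====
-- stated objective: alternative
-- what changed: Replaces the itertools.product generator plus islice with a direct counter: each of the n strings is computed by writing a running block counter in base 26 (digit d -> letters[d]) at the current length, advancing length when a block is exhausted.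
import Mathlib
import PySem

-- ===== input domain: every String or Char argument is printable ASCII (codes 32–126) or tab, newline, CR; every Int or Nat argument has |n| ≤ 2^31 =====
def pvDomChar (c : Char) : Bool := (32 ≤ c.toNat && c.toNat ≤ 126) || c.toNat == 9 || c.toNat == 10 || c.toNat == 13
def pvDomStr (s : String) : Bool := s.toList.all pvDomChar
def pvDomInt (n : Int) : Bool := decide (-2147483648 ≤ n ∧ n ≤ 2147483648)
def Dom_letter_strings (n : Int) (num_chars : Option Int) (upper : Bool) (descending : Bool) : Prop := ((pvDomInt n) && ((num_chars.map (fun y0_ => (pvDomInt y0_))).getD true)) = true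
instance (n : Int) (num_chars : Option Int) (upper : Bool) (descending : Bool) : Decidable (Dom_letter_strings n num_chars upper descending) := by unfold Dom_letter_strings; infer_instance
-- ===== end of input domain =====

-- B replaces A's itertools.product generator with direct base-26 digit arithmetic on a
-- running counter (alternative decomposition, same cost); A's lazy generator/islice pair
-- is ported as a fused "take" so the port only materialises the strings A actually yields.

-- shared alphabet (ascii_lowercase / ascii_uppercase; both Pythons compute it the same way)
def lowerChars : List Char :=
  ['a','b','c','d','e','f','g','h','i','j','k','l','m','n','o','p','q','r','s','t','u','v','w','x','y','z']
def upperChars : List Char :=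
  ['A','B','C','D','E','F','G','H','I','J','K','L','M','N','O','P','Q','R','S','T','U','V','W','X','Y','Z']
def lettersOf (upper descending : Bool) : List Char :=
  let base := if upper then upperChars else lowerChars
  if descending then base.reverse else base

-- the `num_chars = 1; while n > 26 ** num_chars: num_chars += 1` loop (identical source
-- text in A and in Source B, shared)
theorem findNC_dec {n : Int} {k : Nat} (h : (26:Int) ^ k < n) :
    n.toNat - (k + 1) < n.toNat - k :=
  Nat.sub_succ_lt_self _ _ (Int.lt_toNat.mpr (lt_of_le_of_lt
    (le_trans (Int.ofNat_le.mpr (Nat.le_of_lt (Nat.lt_pow_self (by decide))))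
      (le_of_eq (Nat.cast_pow 26 k))) h))

def findNC (n : Int) (k : Nat) : Nat :=
  if h : (26:Int) ^ k < n then findNC n (k + 1) else k
termination_by n.toNat - k
decreasing_by exact findNC_dec h

-- ===== PORT A =====
-- itertools.product(letters, repeat=L) is lazy and islice pulls only n items; the port
-- fuses the two: prodTake a n L = first n tuples of the product, in product order.
mutual
def prodTake (a : List Char) : Nat → Nat → List (List Char)
  | n, 0 => match n with | 0 => [] | _ + 1 => [[]]
  | n, L + 1 => prodTakeAux a a n L
termination_by n L => (L, 0)

def prodTakeAux (a : List Char) : List Char → Nat → Nat → List (List Char)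
  | [], _, _ => []
  | c :: cs, n, L =>
    if n = 0 then [] else
      (prodTake a n L).map (fun s => c :: s) ++
        prodTakeAux a cs (n - ((prodTake a n L).map (fun s => c :: s)).length) L
termination_by cs n L => (L, cs.length + 1)
end

-- list(islice(gen, n)) keeps pulling block after block (length L, then L+1, ...) until n
-- strings have been collected; the fuel argument (always supplied > n) only makes the
-- recursion structural, it never cuts the computation short
def takeBlocksA (u d : Bool) : Nat → Nat → Nat → List String
  | 0, _, _ => []
  | fuel + 1, L, n =>
    let blk := (prodTake (lettersOf u d) n L).map String.mk
    if blk.length = n then blk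
    else blk ++ takeBlocksA u d fuel (L + 1) (n - blk.length)

def letter_strings (n : Int) (num_chars : Option Int) (upper : Bool) (descending : Bool) : List String :=
  let nc : Nat := match num_chars with
    | none => findNC n 1
    | some k => k.toNat   -- Python raises ValueError for k < 0 (excluded by Pre_)
  takeBlocksA upper descending (n.toNat + 1) nc n.toNat   -- islice raises ValueError for n < 0 (excluded by Pre_)

-- ===== PORT B =====
-- digits.append(letters[x % 26]); x //= 26  -- repeated `length` times (index x % 26 is
-- always in range, so plain getD is exact here)
def digitsRev (a : List Char) : Nat → Nat → List Char
  | _, 0 => []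
  | x, L + 1 => a.getD (x % 26) 'a' :: digitsRev a (x / 26) L

-- the `for _ in range(n)` loop of Source B: state = (length, counter), one string per step.
-- `length` stays an Int like Source B's: `for _ in range(length)` runs length.toNat times, and
-- `counter == 26 ** length` is false whenever length < 0 (a float < 1 vs an int ≥ 1) —
-- both rendered exactly by `.toNat` plus the `0 ≤ L ∧` guard.
def bloop (a : List Char) : Int → Nat → Nat → List String
  | _, _, 0 => []
  | L, c, m + 1 =>
    let s := String.mk (digitsRev a c L.toNat).reverse
    if 0 ≤ L ∧ (c : Int) + 1 = 26 ^ L.toNat then s :: bloop a (L + 1) 0 m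
    else s :: bloop a L (c + 1) m

def letter_strings_alt (n : Int) (num_chars : Option Int) (upper : Bool) (descending : Bool) : List String :=
  let nc : Int := match num_chars with
    | none => (findNC n 1 : Nat)
    | some k => k
  bloop (lettersOf upper descending) nc 0 n.toNat

-- ===== PRECONDITION & SPEC =====
-- Pre_ excludes exactly the inputs on which A raises ValueError: n < 0 (islice) and a
-- supplied negative num_chars (itertools.product repeat argument).
def Pre_letter_strings (n : Int) (num_chars : Option Int) (upper : Bool) (descending : Bool) : Prop :=
  0 ≤ n ∧ 0 ≤ num_chars.getD 0

instance (n : Int) (num_chars : Option Int) (upper : Bool) (descending : Bool) : Decidable (Pre_letter_strings n num_chars upper descending) := by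
  unfold Pre_letter_strings; infer_instance

def pvWitness_letter_strings : Int × Option Int × Bool × Bool := (3, some 2, false, true)

def Spec_letter_strings (n : Int) (num_chars : Option Int) (upper : Bool) (descending : Bool) (out : List String) : Prop := out = letter_strings_alt n num_chars upper descending
instance (n : Int) (num_chars : Option Int) (upper : Bool) (descending : Bool) (out : List String) : Decidable (Spec_letter_strings n num_chars upper descending out) := by unfold Spec_letter_strings; infer_instance

-- ===== CLAIM (what is proved, stated in full; the proofs are below) =====
def Claim_equal_letter_strings : Prop := ∀ (n : Int) (num_chars : Option Int) (upper : Bool) (descending : Bool), Dom_letter_strings n num_chars upper descending → Pre_letter_strings n num_chars upper descending → Spec_letter_strings n num_chars upper descending (letter_strings n num_chars upper descending)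

-- ===== LEMMAS AND PROOFS =====

theorem prodTake_zero_zero (a : List Char) : prodTake a 0 0 = [] := by
  rw [prodTake.eq_def]

theorem prodTake_zero_succ (a : List Char) (m : Nat) : prodTake a (m + 1) 0 = [[]] := by
  rw [prodTake.eq_def]

theorem prodTake_succL (a : List Char) (n L : Nat) :
    prodTake a n (L + 1) = prodTakeAux a a n L := by
  rw [prodTake.eq_def]

theorem prodTakeAux_nil (a : List Char) (n L : Nat) : prodTakeAux a [] n L = [] := by
  rw [prodTakeAux.eq_def]

theorem prodTakeAux_cons (a : List Char) (c : Char) (cs : List Char) (n L : Nat) :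
    prodTakeAux a (c :: cs) n L =
      if n = 0 then [] else
        (prodTake a n L).map (fun s => c :: s) ++
          prodTakeAux a cs (n - ((prodTake a n L).map (fun s => c :: s)).length) L := by
  rw [prodTakeAux.eq_def]


-- proof-side spec of the FULL product block (what itertools.product(letters, repeat=L)
-- would yield in total, in order)
def prodStrings (a : List Char) : Nat → List (List Char)
  | 0 => [[]]
  | L + 1 => a.flatMap (fun c => (prodStrings a L).map (fun s => c :: s))

def strRep (a : List Char) (L x : Nat) : String := String.mk (digitsRev a x L).reverse

-- bloop at a nonnegative (cast) length, with the counter test in Nat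
def bloopN (a : List Char) : Nat → Nat → Nat → List String
  | _, _, 0 => []
  | L, c, m + 1 =>
    let s := String.mk (digitsRev a c L).reverse
    if c + 1 = 26 ^ L then s :: bloopN a (L + 1) 0 m
    else s :: bloopN a L (c + 1) m

theorem bloop_coe (a : List Char) :
    ∀ (m L c : Nat), bloop a (L : Int) c m = bloopN a L c m := by
  intro m
  induction m with
  | zero => intro L c; rfl
  | succ m ih =>
    intro L c
    rw [bloop, bloopN]
    simp only [Int.toNat_natCast]
    by_cases h : c + 1 = 26 ^ L
    · rw [if_pos ⟨Int.natCast_nonneg L, by exact_mod_cast h⟩, if_pos h,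
        show (L : Int) + 1 = ((L + 1 : Nat) : Int) by push_cast; ring, ih]
    · rw [if_neg (fun hc => h (by exact_mod_cast hc.2)), if_neg h, ih]

theorem map_eq_range_getD {α β : Type} (g : α → β) (dflt : α) :
    ∀ (l : List α), l.map g = (List.range l.length).map (fun r => g (l.getD r dflt)) := by
  intro l
  induction l with
  | nil => simp
  | cons a l ih =>
    simp only [List.map_cons, List.length_cons, List.range_succ_eq_map, List.map_map,
      List.getD_cons_zero]
    congr 1

theorem prodStrings_snoc (a : List Char) :
    ∀ L, prodStrings a (L + 1) = (prodStrings a L).flatMap (fun s => a.map (fun c => s ++ [c])) := by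
  intro L
  induction L with
  | zero =>
    simp only [prodStrings]
    have hsing : ∀ l : List Char, l.flatMap (fun c => [[c]]) = l.map (fun c => [c]) := by
      intro l
      induction l with
      | nil => rfl
      | cons x xs ih2 => simp [ih2]
    simp [hsing]
  | succ L ih =>
    conv_lhs => rw [prodStrings, ih]
    conv_rhs => rw [prodStrings]
    simp only [List.map_flatMap, List.flatMap_map, List.flatMap_assoc, List.map_map]
    rfl

theorem range_mul_flatMap (b : Nat) :
    ∀ a, List.range (a * b) = (List.range a).flatMap (fun q => (List.range b).map (fun r => q * b + r)) := by
  intro a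
  induction a with
  | zero => simp
  | succ a ih =>
    have : (a + 1) * b = a * b + b := by ring
    rw [this, List.range_add, ih, List.range_succ, List.flatMap_append]
    simp

theorem digitsRev_step (a : List Char) (L q r : Nat) (hr : r < 26) :
    digitsRev a (q * 26 + r) (L + 1) = a.getD r 'a' :: digitsRev a q L := by
  rw [digitsRev]
  have h1 : (q * 26 + r) % 26 = r := by omega
  have h2 : (q * 26 + r) / 26 = q := by omega
  rw [h1, h2]

theorem prodStrings_range (a : List Char) (ha : a.length = 26) :
    ∀ L, prodStrings a L = (List.range (26 ^ L)).map (fun x => (digitsRev a x L).reverse) := by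
  intro L
  induction L with
  | zero => simp [prodStrings, digitsRev]
  | succ L ih =>
    rw [prodStrings_snoc, ih, List.flatMap_map]
    have hmap : ∀ q : Nat, a.map (fun c => (digitsRev a q L).reverse ++ [c])
        = (List.range 26).map (fun r => (digitsRev a (q * 26 + r) (L + 1)).reverse) := by
      intro q
      rw [map_eq_range_getD (fun c => (digitsRev a q L).reverse ++ [c]) 'a' a, ha]
      apply List.map_congr_left
      intro r hr
      rw [digitsRev_step a L q r (List.mem_range.mp hr)]
      simp
    calc (List.range (26 ^ L)).flatMap (fun q => a.map (fun c => (digitsRev a q L).reverse ++ [c]))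
        = (List.range (26 ^ L)).flatMap
            (fun q => (List.range 26).map (fun r => (digitsRev a (q * 26 + r) (L + 1)).reverse)) := by
          rw [funext hmap]
      _ = (List.range (26 ^ (L + 1))).map (fun x => (digitsRev a x (L + 1)).reverse) := by
          rw [pow_succ, range_mul_flatMap, List.map_flatMap]
          rfl

theorem prodTakeAux_spec (a : List Char) (L : Nat)
    (IH : ∀ n, prodTake a n L = (prodStrings a L).take n) :
    ∀ (cs : List Char) (n : Nat),
      prodTakeAux a cs n L = ((cs.flatMap (fun c => (prodStrings a L).map (fun s => c :: s))).take n) := by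
  intro cs
  induction cs with
  | nil => intro n; simp [prodTakeAux_nil]
  | cons c cs ih =>
    intro n
    rw [prodTakeAux_cons]
    split
    · rename_i hn; subst hn; simp
    · rename_i hn
      simp only [List.flatMap_cons]
      rw [List.take_append]
      rw [IH, List.map_take, ih]
      congr 1
      congr 1
      simp only [List.length_take, List.length_map]
      omega

theorem prodTake_spec (a : List Char) :
    ∀ (L n : Nat), prodTake a n L = (prodStrings a L).take n := by
  intro L
  induction L with
  | zero =>
    intro n
    cases n with
    | zero => simp [prodTake_zero_zero, prodStrings]
    | succ m => simp [prodTake_zero_succ, prodStrings]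
  | succ L ih =>
    intro n
    rw [prodTake_succL, prodStrings]
    exact prodTakeAux_spec a L ih a n

theorem bloop_within (a : List Char) (L : Nat) :
    ∀ (m c : Nat), c + m ≤ 26 ^ L → bloopN a L c m = (List.range' c m).map (strRep a L) := by
  intro m
  induction m with
  | zero => intro c _; simp [bloopN]
  | succ m ih =>
    intro c hc
    rw [bloopN]
    split
    · rename_i h
      have hm : m = 0 := by omega
      subst hm
      simp [bloopN, List.range', strRep]
    · rename_i h
      rw [ih (c + 1) (by omega)]
      simp [List.range'_succ, strRep]

theorem bloop_cross (a : List Char) :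
    ∀ (m L c : Nat), c < 26 ^ L → 26 ^ L < c + m →
      bloopN a L c m = (List.range' c (26 ^ L - c)).map (strRep a L) ++ bloopN a (L + 1) 0 (m - (26 ^ L - c)) := by
  intro m
  induction m with
  | zero => intro L c h1 h2; omega
  | succ m ih =>
    intro L c h1 h2
    rw [bloopN]
    split
    · rename_i h
      have e1 : 26 ^ L - c = 1 := by omega
      rw [e1]
      simp [List.range'_succ, strRep]
    · rename_i h
      have h1' : c + 1 < 26 ^ L := by omega
      rw [ih L (c + 1) h1' (by omega)]
      rw [show m + 1 - (26 ^ L - c) = m - (26 ^ L - (c + 1)) by omega]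
      rw [show 26 ^ L - c = (26 ^ L - (c + 1)) + 1 by omega, List.range'_succ]
      simp only [List.map_cons, List.cons_append]
      rfl

theorem takeBlocksA_eq_bloop (u d : Bool) :
    ∀ (n fuel L : Nat), n < fuel → takeBlocksA u d fuel L n = bloopN (lettersOf u d) L 0 n := by
  intro n
  induction n using Nat.strong_induction_on with
  | _ n IH =>
    intro fuel L hf
    have ha : (lettersOf u d).length = 26 := by cases u <;> cases d <;> decide
    have hB : 0 < 26 ^ L := pow_pos (by omega : (0:ℕ) < 26) L
    obtain ⟨f, rfl⟩ : ∃ f, fuel = f + 1 := ⟨fuel - 1, by omega⟩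
    have hblk : (prodTake (lettersOf u d) n L).map String.mk
        = (List.range (min n (26 ^ L))).map (strRep (lettersOf u d) L) := by
      rw [prodTake_spec, prodStrings_range (lettersOf u d) ha, ← List.map_take, List.take_range]
      simp [strRep, Function.comp]
    rw [takeBlocksA]
    simp only [hblk, List.length_map, List.length_range]
    by_cases hle : n ≤ 26 ^ L
    · have hmin : min n (26 ^ L) = n := by omega
      rw [hmin, if_pos rfl]
      rw [bloop_within (lettersOf u d) L n 0 (by omega)]
      rw [List.range_eq_range']
    · have hmin : min n (26 ^ L) = 26 ^ L := by omega
      rw [hmin, if_neg (by omega)]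
      rw [bloop_cross (lettersOf u d) n L 0 hB (by omega)]
      rw [IH (n - 26 ^ L) (by omega) f (L + 1) (by omega)]
      simp [List.range_eq_range']

-- ===== VERDICT (by name: the statement is the Claim_ definition above) =====
theorem letter_strings_spec : Claim_equal_letter_strings := by
  intro n num_chars upper descending _ hpre
  unfold Spec_letter_strings letter_strings letter_strings_alt
  cases num_chars with
  | none =>
    rw [bloop_coe]
    exact takeBlocksA_eq_bloop upper descending _ _ _ (Nat.lt_succ_self _)
  | some k =>
    rw [show k = ((k.toNat : Nat) : Int) from (Int.toNat_of_nonneg hpre.2).symm, bloop_coe]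
    exact takeBlocksA_eq_bloop upper descending _ _ _ (Nat.lt_succ_self _)
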